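-- pv_equiv track=rewrite | github.com/tsinghua-fib-lab/RoadBench | fpv_lane_designations.py | convert_lane_designations_to_abcd
-- ===== SOURCE A (Python) =====
-- def convert_lane_designations_to_abcd(lane_designations):
--     """
--     将车道导向种类转换为ABCD格式
--
--     Args:
--         lane_designations: 车道导向种类列表，每个元素是一个车道的导向种类列表
--
--     Returns:
--         转换后的ABCD格式列表，每个元素是一个车道的ABCD字符串
--     """
--     direction_map = {
--         "u-turn": "A",
--         "left-turn": "B",
--         "straight": "C",
--         "right-turn": "D",
--         "variable": "G",
--     }
--
--     result = []
--     for lane_directions in lane_designations: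
--         abcd_chars = []
--         for direction in lane_directions:
--             if isinstance(direction, str) and direction.lower() in direction_map:
--                 abcd_chars.append(direction_map[direction.lower()])
--         result.append("".join(sorted(abcd_chars)))  # 排序保证一致性
--
--     return result
-- ===== SOURCE B (Python) =====
-- def convert_lane_designations_to_abcd(lane_designations):
--     direction_map = {
--         "u-turn": "A",
--         "left-turn": "B",
--         "straight": "C",
--         "right-turn": "D",
--         "variable": "G",
--     }
--     result = []
--     for lane_directions in lane_designations:
--         a = b = c = d = g = 0
--         for direction in lane_directions:
--             if isinstance(direction, str):
--                 letter = direction_map.get(direction.lower())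
--                 if letter == "A":
--                     a += 1
--                 elif letter == "B":
--                     b += 1
--                 elif letter == "C":
--                     c += 1
--                 elif letter == "D":
--                     d += 1
--                 elif letter == "G":
--                     g += 1
--         result.append("A" * a + "B" * b + "C" * c + "D" * d + "G" * g)
--     return result
-- ===== Notes on version B (the rewrite author's own statement) =====
-- stated objective: alternative
-- what changed: B replaces A's collect-the-letters-then-comparison-sort per lane by five per-letter counters filled in one pass and a counting-sort style emission in the fixed canonical order A,B,C,D,G.
import Mathlib
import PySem

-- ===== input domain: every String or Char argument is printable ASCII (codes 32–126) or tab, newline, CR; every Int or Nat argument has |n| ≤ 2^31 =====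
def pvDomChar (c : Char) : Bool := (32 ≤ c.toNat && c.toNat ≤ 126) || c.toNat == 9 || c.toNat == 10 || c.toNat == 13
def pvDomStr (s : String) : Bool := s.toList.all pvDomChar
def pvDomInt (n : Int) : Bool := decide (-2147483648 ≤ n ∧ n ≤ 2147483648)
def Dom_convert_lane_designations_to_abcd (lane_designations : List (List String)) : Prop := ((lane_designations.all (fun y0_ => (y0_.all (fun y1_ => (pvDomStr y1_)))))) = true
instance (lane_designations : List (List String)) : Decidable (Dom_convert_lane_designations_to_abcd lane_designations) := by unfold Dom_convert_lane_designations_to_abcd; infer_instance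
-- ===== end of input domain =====

-- B replaces A's collect-then-comparison-sort of letter codes by five per-letter counters and
-- emits the letters in the fixed canonical order "ABCDG" (a counting sort); objective: alternative algorithm, same cost.

-- ===== PORT A =====
def pvDirMap : PySem.Dict String String :=
  PySem.Dict.ofList [("u-turn","A"),("left-turn","B"),("straight","C"),("right-turn","D"),("variable","G")]

def convert_lane_designations_to_abcd (lane_designations : List (List String)) : List String :=
  lane_designations.foldl (fun result lane_directions =>
    let abcd_chars := lane_directions.foldl (fun acc direction =>
      if pvDirMap.contains (PySem.Str.lower direction) then
        acc ++ [pvDirMap.getD (PySem.Str.lower direction) ""]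
      else acc) []
    result ++ [PySem.Str.join "" (PySem.List.sorted abcd_chars (fun x => x) false)]) []

-- ===== PORT B =====
-- "A" * a  (single-character string repetition)
def pvRep (c : Char) (n : Nat) : String := String.ofList (List.replicate n c)

def convert_lane_designations_to_abcd_alt (lane_designations : List (List String)) : List String :=
  lane_designations.foldl (fun result lane_directions =>
    let cnt := lane_directions.foldl (fun (st : Nat × Nat × Nat × Nat × Nat) direction =>
      let letter := pvDirMap.get? (PySem.Str.lower direction)
      if letter = some "A" then (st.1 + 1, st.2.1, st.2.2.1, st.2.2.2.1, st.2.2.2.2)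
      else if letter = some "B" then (st.1, st.2.1 + 1, st.2.2.1, st.2.2.2.1, st.2.2.2.2)
      else if letter = some "C" then (st.1, st.2.1, st.2.2.1 + 1, st.2.2.2.1, st.2.2.2.2)
      else if letter = some "D" then (st.1, st.2.1, st.2.2.1, st.2.2.2.1 + 1, st.2.2.2.2)
      else if letter = some "G" then (st.1, st.2.1, st.2.2.1, st.2.2.2.1, st.2.2.2.2 + 1)
      else st) (0, 0, 0, 0, 0)
    result ++ [PySem.Str.join "" [pvRep 'A' cnt.1, pvRep 'B' cnt.2.1, pvRep 'C' cnt.2.2.1,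
                                  pvRep 'D' cnt.2.2.2.1, pvRep 'G' cnt.2.2.2.2]]) []

-- ===== PRECONDITION & SPEC =====
def Spec_convert_lane_designations_to_abcd (lane_designations : List (List String)) (out : List String) : Prop := out = convert_lane_designations_to_abcd_alt lane_designations
instance (lane_designations : List (List String)) (out : List String) : Decidable (Spec_convert_lane_designations_to_abcd lane_designations out) := by unfold Spec_convert_lane_designations_to_abcd; infer_instance

-- ===== CLAIM (what is proved, stated in full; the proofs are below) =====
def Claim_equal_convert_lane_designations_to_abcd : Prop := ∀ (lane_designations : List (List String)), Dom_convert_lane_designations_to_abcd lane_designations → Spec_convert_lane_designations_to_abcd lane_designations (convert_lane_designations_to_abcd lane_designations)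

-- ===== LEMMAS AND PROOFS =====

theorem pvDirMap_eq : pvDirMap = PySem.Dict.mk [("u-turn","A"),("left-turn","B"),("straight","C"),("right-turn","D"),("variable","G")] := by decide

theorem lookup_eq (s : String) : pvDirMap.get? s =
    if "u-turn" == s then some "A" else if "left-turn" == s then some "B"
    else if "straight" == s then some "C" else if "right-turn" == s then some "D"
    else if "variable" == s then some "G" else none := by
  rw [pvDirMap_eq]
  simp only [PySem.Dict.get?_mk_cons]
  cases e : ("variable" == s) <;> simp [PySem.Dict.get?, List.find?]

theorem contains_eq (s : String) : pvDirMap.contains s = (pvDirMap.get? s).isSome := by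
  rw [pvDirMap_eq]
  simp only [PySem.Dict.contains, PySem.Dict.get?]
  cases e1 : ("u-turn" == s) <;> cases e2 : ("left-turn" == s) <;> cases e3 : ("straight" == s) <;>
    cases e4 : ("right-turn" == s) <;> cases e5 : ("variable" == s) <;>
      simp [List.find?, List.any, e1, e2, e3, e4, e5]

theorem getD_eq (s : String) : pvDirMap.getD s "" = (pvDirMap.get? s).getD "" :=
  PySem.Dict.getD_eq_get?_getD pvDirMap s ""

-- a value looked up in the dict is one of the five codes
theorem pvLet_mem (s v : String) (h : pvDirMap.get? s = some v) :
    v ∈ (["A","B","C","D","G"] : List String) := by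
  rw [lookup_eq] at h
  split_ifs at h <;> simp_all

-- A's inner loop collects the mapped letters (in order)
theorem abcd_chars_eq (lane : List String) :
    lane.foldl (fun acc direction =>
      if pvDirMap.contains (PySem.Str.lower direction) then
        acc ++ [pvDirMap.getD (PySem.Str.lower direction) ""]
      else acc) [] =
    lane.filterMap (fun d => pvDirMap.get? (PySem.Str.lower d)) := by
  rw [PySem.List.foldl_append_if (fun d => pvDirMap.contains (PySem.Str.lower d))
      (fun d => pvDirMap.getD (PySem.Str.lower d) "") lane []]
  simp only [List.nil_append]
  induction lane with
  | nil => rfl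
  | cons x t ih =>
    rw [List.filter_cons, List.filterMap_cons]
    by_cases h : pvDirMap.contains (PySem.Str.lower x) = true
    · have hs := (contains_eq (PySem.Str.lower x)) ▸ h
      rcases ho : pvDirMap.get? (PySem.Str.lower x) with _ | v
      · rw [ho] at hs; simp at hs
      · have hgd : pvDirMap.getD (PySem.Str.lower x) "" = v := by
          rw [getD_eq, ho]; rfl
        simp only [h, if_true, List.map_cons, hgd]
        exact congrArg (v :: ·) ih
    · rcases ho : pvDirMap.get? (PySem.Str.lower x) with _ | v
      · simp only [Bool.not_eq_true] at h
        simp only [h, Bool.false_eq_true, if_false]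
        exact ih
      · exact absurd ((contains_eq (PySem.Str.lower x)).trans (by rw [ho]; rfl)) h

-- B's inner loop counts each letter
theorem cnt_eq (lane : List String) (a b c d g : Nat) :
    lane.foldl (fun (st : Nat × Nat × Nat × Nat × Nat) direction =>
      let letter := pvDirMap.get? (PySem.Str.lower direction)
      if letter = some "A" then (st.1 + 1, st.2.1, st.2.2.1, st.2.2.2.1, st.2.2.2.2)
      else if letter = some "B" then (st.1, st.2.1 + 1, st.2.2.1, st.2.2.2.1, st.2.2.2.2)
      else if letter = some "C" then (st.1, st.2.1, st.2.2.1 + 1, st.2.2.2.1, st.2.2.2.2)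
      else if letter = some "D" then (st.1, st.2.1, st.2.2.1, st.2.2.2.1 + 1, st.2.2.2.2)
      else if letter = some "G" then (st.1, st.2.1, st.2.2.1, st.2.2.2.1, st.2.2.2.2 + 1)
      else st) (a, b, c, d, g) =
    (a + (lane.filterMap (fun d => pvDirMap.get? (PySem.Str.lower d))).count "A",
     b + (lane.filterMap (fun d => pvDirMap.get? (PySem.Str.lower d))).count "B",
     c + (lane.filterMap (fun d => pvDirMap.get? (PySem.Str.lower d))).count "C",
     d + (lane.filterMap (fun d => pvDirMap.get? (PySem.Str.lower d))).count "D",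
     g + (lane.filterMap (fun d => pvDirMap.get? (PySem.Str.lower d))).count "G") := by
  induction lane generalizing a b c d g with
  | nil => simp
  | cons x t ih =>
    simp only [List.foldl_cons, List.filterMap_cons]
    rcases ho : pvDirMap.get? (PySem.Str.lower x) with _ | v
    · simp [ih]
    · have hv := pvLet_mem (PySem.Str.lower x) v ho
      fin_cases hv <;> simp [ho, ih] <;> omega

-- ≤-pairwise for a replicate block
theorem pvRepPairwise (n : Nat) (s : String) :
    List.Pairwise (fun a b : String => a ≤ b) (List.replicate n s) :=
  List.pairwise_replicate.mpr (Or.inr le_rfl)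

-- counting-sort characterisation of the sorted letter list
theorem sorted_eq_replicates (ls : List String)
    (hmem : ∀ v ∈ ls, v ∈ (["A","B","C","D","G"] : List String)) :
    PySem.List.sorted ls (fun x => x) false =
      List.replicate (ls.count "A") "A" ++ List.replicate (ls.count "B") "B" ++
      List.replicate (ls.count "C") "C" ++ List.replicate (ls.count "D") "D" ++
      List.replicate (ls.count "G") "G" := by
  apply PySem.List.sorted_id_eq_of_perm_of_pairwise
  · rw [List.perm_iff_count]
    intro v
    by_cases hv : v ∈ (["A","B","C","D","G"] : List String)
    · fin_cases hv <;> simp [List.count_append, List.count_replicate]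
    · have h0 : ls.count v = 0 := by
        rw [List.count_eq_zero]; intro hc; exact hv (hmem v hc)
      simp only [List.mem_cons, not_or] at hv
      obtain ⟨h1, h2, h3, h4, h5, -⟩ := hv
      simp [List.count_append, List.count_replicate, h0,
            Ne.symm h1, Ne.symm h2, Ne.symm h3, Ne.symm h4, Ne.symm h5]
  · rw [List.pairwise_append, List.pairwise_append, List.pairwise_append, List.pairwise_append]
    refine ⟨⟨⟨⟨pvRepPairwise _ _, pvRepPairwise _ _, ?_⟩, pvRepPairwise _ _, ?_⟩,
             pvRepPairwise _ _, ?_⟩, pvRepPairwise _ _, ?_⟩ <;>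
      intro p hp q hq <;>
      simp only [List.mem_append, List.mem_replicate] at hp hq <;>
      [ (obtain ⟨-, rfl⟩ := hp; obtain ⟨-, rfl⟩ := hq);
        (obtain ⟨-, rfl⟩ := hq; rcases hp with ⟨-, rfl⟩ | ⟨-, rfl⟩);
        (obtain ⟨-, rfl⟩ := hq; rcases hp with (⟨-, rfl⟩ | ⟨-, rfl⟩) | ⟨-, rfl⟩);
        (obtain ⟨-, rfl⟩ := hq; rcases hp with ((⟨-, rfl⟩ | ⟨-, rfl⟩) | ⟨-, rfl⟩) | ⟨-, rfl⟩)] <;>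
      rw [String.le_iff_toList_le] <;> decide

-- Chars.join with empty separator is concatenation
theorem joinNil (ps : List (List Char)) : PySem.Chars.join [] ps = ps.flatten := by
  induction ps with
  | nil => rfl
  | cons x t ih => cases t <;> simp_all [PySem.Chars.join, List.intercalate, List.intersperse]

-- gluing: per-lane string equality
theorem lane_eq (lane : List String) :
    PySem.Str.join "" (PySem.List.sorted (lane.filterMap (fun d => pvDirMap.get? (PySem.Str.lower d))) (fun x => x) false) =
    PySem.Str.join "" [pvRep 'A' ((lane.filterMap (fun d => pvDirMap.get? (PySem.Str.lower d))).count "A"),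
                       pvRep 'B' ((lane.filterMap (fun d => pvDirMap.get? (PySem.Str.lower d))).count "B"),
                       pvRep 'C' ((lane.filterMap (fun d => pvDirMap.get? (PySem.Str.lower d))).count "C"),
                       pvRep 'D' ((lane.filterMap (fun d => pvDirMap.get? (PySem.Str.lower d))).count "D"),
                       pvRep 'G' ((lane.filterMap (fun d => pvDirMap.get? (PySem.Str.lower d))).count "G")] := by
  have hmem : ∀ v ∈ lane.filterMap (fun d => pvDirMap.get? (PySem.Str.lower d)),
      v ∈ (["A","B","C","D","G"] : List String) := by
    intro v hv
    rw [List.mem_filterMap] at hv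
    obtain ⟨s, -, hs⟩ := hv
    exact pvLet_mem (PySem.Str.lower s) v hs
  apply String.toList_inj.mp
  rw [PySem.Str.toList_join, PySem.Str.toList_join]
  rw [sorted_eq_replicates _ hmem]
  simp only [List.map_append, List.map_replicate, List.map_cons, List.map_nil]
  have h0 : ("".toList : List Char) = [] := rfl
  rw [h0, joinNil, joinNil]
  simp [pvRep, String.toList_ofList]

-- ===== VERDICT (by name: the statement is the Claim_ definition above) =====
theorem convert_lane_designations_to_abcd_spec : Claim_equal_convert_lane_designations_to_abcd := by
  intro xs _
  unfold Spec_convert_lane_designations_to_abcd convert_lane_designations_to_abcd convert_lane_designations_to_abcd_alt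
  rw [PySem.List.foldl_append_singleton_eq_map, PySem.List.foldl_append_singleton_eq_map]
  simp only [List.nil_append]
  apply List.map_congr_left
  intro lane _
  simp only [abcd_chars_eq, cnt_eq, Nat.zero_add]
  exact lane_eq lane
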